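-- pv_equiv track=rewrite | github.com/kmorgan31/adventofcode | 2015/day8.py | part_2
-- ===== SOURCE A (Python) =====
-- def part_2(data):
--     num_code, num_encoded = 0, 0
--
--     for line in data:
--
--         i = 0
--         while i < len(line):
--             if line[i] == "\"":
--                 num_encoded += 3
--                 num_code += 1
--                 i += 1
--             elif line[i] == "\\":
--                 num_encoded += 3
--                 num_code += 1
--                 if line[i+1] in ["\\", "\""]:
--                     num_encoded += 1
--                     num_code += 1
--                     i += 2
--                 elif line[i+1] == "x":
--                     num_encoded += 2
--                     num_code += 3
--                     i += 4
--             else: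
--                 num_encoded += 1
--                 num_code += 1
--                 i += 1
--     return num_encoded - num_code
-- ===== SOURCE B (Python) =====
-- def _tokens(line):
--     toks = []
--     rest = line
--     while rest:
--         if rest.startswith('\\x'):
--             toks.append(rest[:4])
--             rest = rest[4:]
--         elif rest.startswith('\\\\') or rest.startswith('\\"'):
--             toks.append(rest[:2])
--             rest = rest[2:]
--         else:
--             toks.append(rest[:1])
--             rest = rest[1:]
--     return toks
--
--
-- def _weight(tok):
--     if tok.startswith('\\x'):
--         return 1
--     if len(tok) == 2:
--         return 2
--     return 2 if tok == '"' else 0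
--
--
-- def part_2(data):
--     return sum(_weight(tok) for line in data for tok in _tokens(line))
-- ===== Notes on version B (the rewrite author's own statement) =====
-- stated objective: alternative
-- what changed: Replaces A's cursor/index while-loop that threads two running counters (num_code, num_encoded) with a tokenize-then-sum pass: each line is split into escape tokens (\x.., \\, \", single chars) and each token is mapped to its length-difference weight, summing the weights directly.
-- outside the precondition, e.g. on part_2(['\\x\\a']): A returns 1, B returns 1; on part_2(['a\\\\b']): A returns 2, B returns 2
import Mathlib
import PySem

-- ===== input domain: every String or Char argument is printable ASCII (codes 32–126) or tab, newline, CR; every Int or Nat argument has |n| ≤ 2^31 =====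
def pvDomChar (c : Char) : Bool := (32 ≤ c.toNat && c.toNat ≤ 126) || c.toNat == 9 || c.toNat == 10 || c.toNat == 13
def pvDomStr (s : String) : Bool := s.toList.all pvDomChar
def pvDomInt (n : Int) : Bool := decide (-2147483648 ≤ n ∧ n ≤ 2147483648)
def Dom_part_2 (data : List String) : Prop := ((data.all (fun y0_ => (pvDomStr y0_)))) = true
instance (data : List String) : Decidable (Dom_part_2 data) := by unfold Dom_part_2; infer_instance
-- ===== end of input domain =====

-- B replaces A's index/while loop with two counters by a tokenize-then-sum pass (same O(n) cost, different decomposition).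


-- ===== PORT A =====
-- A's while-loop over index i, threading (num_encoded, num_code); fuel = line length + 1
-- suffices because every terminating iteration advances i by ≥ 1 (inputs where A raises or
-- loops forever — a '\' not followed by '\', '"' or 'x' that A actually inspects — are
-- outside Pre_part_2, so the fuel-exhaustion / none branches are never claimed about).
def aLoop (cs : List Char) (i : Int) (ne nc : Int) : Nat → Int × Int
  | 0 => (ne, nc)
  | fuel + 1 =>
    if i < (cs.length : Int) then
      match PySem.List.pyGet? cs i with
      | none => (ne, nc)
      | some c =>
        if c = '"' then aLoop cs (i + 1) (ne + 3) (nc + 1) fuel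
        else if c = '\\' then
          match PySem.List.pyGet? cs (i + 1) with
          | none => (ne + 3, nc + 1)  -- Python raises IndexError here (outside Pre_)
          | some c2 =>
            if c2 = '\\' ∨ c2 = '"' then aLoop cs (i + 2) (ne + 3 + 1) (nc + 1 + 1) fuel
            else if c2 = 'x' then aLoop cs (i + 4) (ne + 3 + 2) (nc + 1 + 3) fuel
            else aLoop cs i (ne + 3) (nc + 1) fuel  -- Python loops forever here (outside Pre_)
        else aLoop cs (i + 1) (ne + 1) (nc + 1) fuel
    else (ne, nc)

def part_2 (data : List String) : Int :=
  let p := data.foldl (fun (p : Int × Int) line =>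
    aLoop line.toList 0 p.1 p.2 (line.toList.length + 1)) (0, 0)
  p.1 - p.2

-- ===== PORT B =====
def bTokens : List Char → List (List Char)
  | [] => []
  | c :: cs =>
    if c = '\\' ∧ cs.head? = some 'x' then
      ((c :: cs).take 4) :: bTokens ((c :: cs).drop 4)
    else if c = '\\' ∧ (cs.head? = some '\\' ∨ cs.head? = some '"') then
      ((c :: cs).take 2) :: bTokens ((c :: cs).drop 2)
    else
      [c] :: bTokens cs
  termination_by cs => cs.length
  decreasing_by all_goals simp

def bWeight (tok : List Char) : Int :=
  match tok with
  | '\\' :: 'x' :: _ => 1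
  | t => if t.length = 2 then 2 else if t = ['"'] then 2 else 0

def part_2_alt (data : List String) : Int :=
  data.foldl (fun acc line => acc + ((bTokens line.toList).map bWeight).sum) 0

-- ===== PRECONDITION & SPEC =====
-- Pre_ excludes inputs containing a backslash not followed by '\', '"' or 'x': on those A
-- raises IndexError (trailing backslash) or loops forever; the condition is checked at every
-- backslash, so it is slightly narrower than A's termination region: it also excludes inputs
-- where such a backslash is only ever crossed as data (consumed by a preceding \x escape, or
-- the second character of an escaped pair), on which A returns and B agrees (see the cites).
def Pre_part_2 (data : List String) : Prop :=
  ∀ line ∈ data, ∀ j < line.toList.length, line.toList[j]? = some '\\' →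
    (line.toList[j+1]? = some '\\' ∨ line.toList[j+1]? = some '"' ∨ line.toList[j+1]? = some 'x')
instance (data : List String) : Decidable (Pre_part_2 data) := by unfold Pre_part_2; infer_instance

def pvWitness_part_2 : List String := ["\"ab\\\"c\\x41\"", "\\\\x1"]

def Spec_part_2 (data : List String) (out : Int) : Prop := out = part_2_alt data
instance (data : List String) (out : Int) : Decidable (Spec_part_2 data out) := by unfold Spec_part_2; infer_instance

-- ===== CLAIM (what is proved, stated in full; the proofs are below) =====
def Claim_equal_part_2 : Prop := ∀ (data : List String), Dom_part_2 data → Pre_part_2 data → Spec_part_2 data (part_2 data)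

-- ===== LEMMAS AND PROOFS =====
-- bWeight facts for the four token shapes produced by bTokens.
theorem bWeight_bsx (t : List Char) : bWeight (List.take 4 ('\\' :: 'x' :: t)) = 1 := rfl

theorem bWeight_bsbs (t : List Char) : bWeight (List.take 2 ('\\' :: '\\' :: t)) = 2 := rfl

theorem bWeight_bsq (t : List Char) : bWeight (List.take 2 ('\\' :: '"' :: t)) = 2 := rfl

theorem bWeight_quote : bWeight ['"'] = 2 := rfl

theorem bWeight_single (c : Char) (h : c ≠ '"') : bWeight [c] = 0 := by
  rw [bWeight.eq_def]
  split
  · next heq => simp at heq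
  · simp [h]

-- Per-line loop invariant: on a line whose every backslash is followed by '\', '"' or 'x',
-- A's loop starting at index i adds (e, c) with e - c = the token-weight sum of the suffix.
theorem aLoop_diff (cs : List Char)
    (h : ∀ j < cs.length, cs[j]? = some '\\' →
      (cs[j+1]? = some '\\' ∨ cs[j+1]? = some '"' ∨ cs[j+1]? = some 'x')) :
    ∀ (fuel i : Nat) (ne nc : Int), cs.length ≤ i + fuel →
      ∃ e c : Int, aLoop cs (i : Int) ne nc fuel = (ne + e, nc + c) ∧
        e - c = ((bTokens (cs.drop i)).map bWeight).sum := by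
  intro fuel
  induction fuel with
  | zero =>
    intro i ne nc hle
    refine ⟨0, 0, ?_, ?_⟩
    · simp [aLoop]
    · rw [List.drop_eq_nil_of_le (by omega)]; simp [bTokens]
  | succ fuel ih =>
    intro i ne nc hle
    by_cases hi : i < cs.length
    · have hcast : (i : Int) < (cs.length : Int) := by exact_mod_cast hi
      have hget : PySem.List.pyGet? cs (i : Int) = some cs[i] := by
        rw [PySem.List.pyGet?_natCast, List.getElem?_eq_getElem hi]
      have hdropi : cs.drop i = cs[i] :: cs.drop (i+1) := List.drop_eq_getElem_cons hi
      by_cases hq : cs[i] = '"'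
      · -- plain quote: weight 2
        obtain ⟨e, c, heq, hd⟩ := ih (i+1) (ne+3) (nc+1) (by omega)
        push_cast at heq
        refine ⟨3 + e, 1 + c, ?_, ?_⟩
        · simp only [aLoop, if_pos hcast, hget]
          rw [if_pos hq, heq]
          simp only [Prod.mk.injEq]
          constructor <;> ring
        · rw [hdropi, hq, bTokens]
          rw [if_neg (by simp), if_neg (by simp)]
          simp only [List.map_cons, List.sum_cons, bWeight_quote]
          omega
      · by_cases hb : cs[i] = '\\'
        · -- backslash: inspect the following character
          have hnext := h i hi (by rw [List.getElem?_eq_getElem hi, hb])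
          have hi1 : i + 1 < cs.length := by
            rcases hnext with h2 | h2 | h2 <;>
              exact (List.getElem?_eq_some_iff.mp h2).1
          have hget1 : PySem.List.pyGet? cs ((i : Int) + 1) = some cs[i+1] := by
            rw [show ((i:Int) + 1 = ((i+1 : Nat) : Int)) by push_cast; ring,
              PySem.List.pyGet?_natCast, List.getElem?_eq_getElem hi1]
          have hdrop1 : cs.drop (i+1) = cs[i+1] :: cs.drop (i+2) := List.drop_eq_getElem_cons hi1
          by_cases hx : cs[i+1] = 'x'
          · -- a backslash-x escape: weight 1, A consumes 4 characters
            obtain ⟨e, c, heq, hd⟩ := ih (i+4) (ne+3+2) (nc+1+3) (by omega)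
            push_cast at heq
            refine ⟨3 + 2 + e, 1 + 3 + c, ?_, ?_⟩
            · simp only [aLoop, if_pos hcast, hget]
              rw [if_neg hq, if_pos hb]
              simp only [hget1]
              rw [if_neg (by rw [hx]; decide), if_pos hx, heq]
              simp only [Prod.mk.injEq]
              constructor <;> ring
            · rw [hdropi, hb, hdrop1, hx, bTokens]
              rw [if_pos ⟨rfl, rfl⟩]
              have ht : List.drop 4 ('\\' :: 'x' :: List.drop (i+2) cs) = List.drop (i+4) cs := by
                simp [List.drop_drop]
              rw [ht]
              simp only [List.map_cons, List.sum_cons, bWeight_bsx]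
              omega
          · -- a backslash-backslash or backslash-quote escape: weight 2, A consumes 2 characters
            have hc2' : cs[i+1] = '\\' ∨ cs[i+1] = '"' := by
              rcases hnext with h2 | h2 | h2 <;>
                rw [List.getElem?_eq_getElem hi1] at h2 <;>
                first
                  | exact absurd (Option.some_injective _ h2) hx
                  | simp [Option.some_injective _ h2]
            obtain ⟨e, c, heq, hd⟩ := ih (i+2) (ne+3+1) (nc+1+1) (by omega)
            push_cast at heq
            refine ⟨3 + 1 + e, 1 + 1 + c, ?_, ?_⟩
            · simp only [aLoop, if_pos hcast, hget]
              rw [if_neg hq, if_pos hb]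
              simp only [hget1]
              rw [if_pos hc2', heq]
              simp only [Prod.mk.injEq]
              constructor <;> ring
            · rw [hdropi, hb, hdrop1]
              have ht : List.drop 2 ('\\' :: cs[i+1] :: List.drop (i+2) cs) = List.drop (i+2) cs := by
                simp
              rcases hc2' with h2 | h2 <;> rw [h2, bTokens]
              · rw [if_neg (by rintro ⟨-, hh⟩; simp at hh), if_pos ⟨rfl, Or.inl rfl⟩]
                rw [h2] at ht; rw [ht]
                simp only [List.map_cons, List.sum_cons, bWeight_bsbs]
                omega
              · rw [if_neg (by rintro ⟨-, hh⟩; simp at hh), if_pos ⟨rfl, Or.inr rfl⟩]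
                rw [h2] at ht; rw [ht]
                simp only [List.map_cons, List.sum_cons, bWeight_bsq]
                omega
        · -- ordinary character: weight 0
          obtain ⟨e, c, heq, hd⟩ := ih (i+1) (ne+1) (nc+1) (by omega)
          push_cast at heq
          refine ⟨1 + e, 1 + c, ?_, ?_⟩
          · simp only [aLoop, if_pos hcast, hget]
            rw [if_neg hq, if_neg hb, heq]
            simp only [Prod.mk.injEq]
            constructor <;> ring
          · rw [hdropi, bTokens]
            rw [if_neg (by rintro ⟨h2, -⟩; exact hb h2), if_neg (by rintro ⟨h2, -⟩; exact hb h2)]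
            simp only [List.map_cons, List.sum_cons, bWeight_single cs[i] hq]
            omega
    · have hcast : ¬ ((i : Int) < (cs.length : Int)) := by exact_mod_cast hi
      refine ⟨0, 0, ?_, ?_⟩
      · simp [aLoop, hcast]
      · rw [List.drop_eq_nil_of_le (by omega)]; simp [bTokens]

-- Thread the per-line invariant through both programs' folds over the lines.
theorem fold_diff : ∀ (data : List String), Pre_part_2 data → ∀ (ne nc a : Int),
    (data.foldl (fun (p : Int × Int) line =>
        aLoop line.toList 0 p.1 p.2 (line.toList.length + 1)) (ne, nc)).1 -
      (data.foldl (fun (p : Int × Int) line =>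
        aLoop line.toList 0 p.1 p.2 (line.toList.length + 1)) (ne, nc)).2 =
    ne - nc +
      (data.foldl (fun acc line => acc + ((bTokens line.toList).map bWeight).sum) a - a) := by
  intro data
  induction data with
  | nil => intro _ ne nc a; simp
  | cons line rest ih =>
    intro hpre ne nc a
    have hline := hpre line (by simp)
    obtain ⟨e, c, heq, hd⟩ :=
      aLoop_diff line.toList hline (line.toList.length + 1) 0 ne nc (by omega)
    have hrest : Pre_part_2 rest := fun l hl => hpre l (by simp [hl])
    simp only [List.foldl_cons]
    simp only [Nat.cast_zero] at heq
    rw [heq, ih hrest (ne + e) (nc + c) (a + ((bTokens line.toList).map bWeight).sum)]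
    rw [List.drop_zero] at hd
    omega

-- ===== VERDICT (by name: the statement is the Claim_ definition above) =====
theorem part_2_spec : Claim_equal_part_2 := by
  intro data _ hpre
  show part_2 data = part_2_alt data
  have h := fold_diff data hpre 0 0 0
  simp only [part_2, part_2_alt]
  omega
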